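-- pv_equiv track=rewrite | github.com/JoohyungDev/algorithm | 프로그래머스/lv1/과일 장수.py | solution
-- ===== SOURCE A (Python) =====
-- def solution(k, m, score):
--     answer = 0
--     idx = 0
--     box_list = []
--     sorted_score = sorted(score, reverse=True)
--
--     while idx+m <= len(sorted_score):
--         for i in range(idx,idx+m):
--                 box_list.append(sorted_score[i])
--                 if len(box_list) == m:
--                     answer += min(box_list)*m
--                     box_list = []
--                     idx += m
--
--     return answer
-- ===== SOURCE B (Python) =====
-- def solution(k, m, score):
--     # Ascending sort. The complete boxes of m are the top (len//m)*m scores;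
--     # each box's minimum sits, in the ascending order, at one of the positions
--     # len(score) % m, len % m + m, len % m + 2m, ...  — so sum that strided
--     # slice once and multiply by m. No grouping, no min() scans, no box buffer.
--     s = sorted(score)
--     return sum(s[len(s) % m::m]) * m
-- ===== Notes on version B (the rewrite author's own statement) =====
-- stated objective: idiomatic
-- what changed: B sorts ascending (A sorts descending) and replaces A's while-loop with box buffering and min() scans by a single modulus computation and one strided slice s[len(s)%m::m] whose sum, times m, is the answer; there is no loop, no grouping and no min at all in B.
import Mathlib
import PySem

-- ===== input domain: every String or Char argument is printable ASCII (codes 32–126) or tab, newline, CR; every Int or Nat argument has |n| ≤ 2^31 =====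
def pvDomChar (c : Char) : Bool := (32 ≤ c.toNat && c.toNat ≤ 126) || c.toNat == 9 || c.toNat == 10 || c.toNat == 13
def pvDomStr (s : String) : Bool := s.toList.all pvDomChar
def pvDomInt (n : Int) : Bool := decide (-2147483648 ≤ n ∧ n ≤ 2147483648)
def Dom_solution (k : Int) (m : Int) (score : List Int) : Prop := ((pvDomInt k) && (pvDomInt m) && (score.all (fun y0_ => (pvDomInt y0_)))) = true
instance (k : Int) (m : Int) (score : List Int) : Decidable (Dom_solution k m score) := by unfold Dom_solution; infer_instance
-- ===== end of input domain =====

-- B sorts ascending and replaces A's while-loop, box buffering and min() scans by a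
-- single strided slice s[len(s)%m::m] summed once and multiplied by m (objective: idiomatic).

-- ===== PORT A =====
-- body of A's inner for-loop; state = (answer, idx, box_list).
-- sorted_score[i] is ported as pyGetD …, exact here because inside the loop idx ≤ i < idx+m ≤ len;
-- min(box_list) as (min? …).getD 0, exact because the branch fires only with len(box_list) = m ≥ 1.
def innerStepA (s : List Int) (m : Int) (st : Int × Int × List Int) (i : Int) : Int × Int × List Int :=
  let box := st.2.2 ++ [PySem.List.pyGetD s i 0]
  if (box.length : Int) = m then
    (st.1 + (PySem.List.min? box (fun x => x)).getD 0 * m, st.2.1 + m, [])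
  else (st.1, st.2.1, box)

-- A's while loop; fuel bounds the iteration count (for m ≥ 1 the loop makes at most
-- len/m iterations, so fuel = len+1 always suffices; for m ≤ 0 Python never returns,
-- which Pre_ excludes).
def loopA (s : List Int) (m : Int) : Nat → Int → Int → List Int → Int
  | 0, ans, _, _ => ans
  | (fuel+1), ans, idx, box =>
    if idx + m ≤ (s.length : Int) then
      let st := (PySem.List.pyRange idx (idx + m) 1).foldl (innerStepA s m) (ans, idx, box)
      loopA s m fuel st.1 st.2.1 st.2.2
    else ans

def solution (k : Int) (m : Int) (score : List Int) : Int :=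
  let sorted_score := PySem.List.sorted score (fun x => x) true
  loopA sorted_score m (score.length + 1) 0 0 []

-- ===== PORT B =====
-- sum(s[len(s) % m :: m]) * m; the slice is PySem.List.slice? (none only for m = 0,
-- where Python's '%' raises first — outside Pre_; .getD [] is never the value on Pre_).
def solution_alt (k : Int) (m : Int) (score : List Int) : Int :=
  let s := PySem.List.sorted score (fun x => x) false
  ((PySem.List.slice? s (some (PySem.Int.mod (s.length : Int) m)) none m).getD []).sum * m

-- ===== PRECONDITION & SPEC =====
-- Pre_ excludes m ≤ 0, on which Python A never returns (its while loop runs forever)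
-- and B's '% m' would raise ZeroDivisionError for m = 0.
def Pre_solution (k : Int) (m : Int) (score : List Int) : Prop := 1 ≤ m
instance (k : Int) (m : Int) (score : List Int) : Decidable (Pre_solution k m score) := by unfold Pre_solution; infer_instance
def pvWitness_solution : Int × Int × List Int := (4, 3, [1, 2, 3, 1, 2, 3, 1])
def Spec_solution (k : Int) (m : Int) (score : List Int) (out : Int) : Prop := out = solution_alt k m score
instance (k : Int) (m : Int) (score : List Int) (out : Int) : Decidable (Spec_solution k m score out) := by unfold Spec_solution; infer_instance

-- ===== CLAIM (what is proved, stated in full; the proofs are below) =====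
def Claim_equal_solution : Prop := ∀ (k : Int) (m : Int) (score : List Int), Dom_solution k m score → Pre_solution k m score → Spec_solution k m score (solution k m score)

-- ===== LEMMAS AND PROOFS =====

theorem pyRange_pos_eq_nil (a b m : Int) (hm : 0 < m) (h : b ≤ a) :
    PySem.List.pyRange a b m = [] := by
  rw [PySem.List.pyRange_of_pos _ _ hm]
  simp [not_lt.mpr h]

theorem pyRange_pos_cons (a b m : Int) (hm : 0 < m) (hab : a < b) :
    PySem.List.pyRange a b m = a :: PySem.List.pyRange (a + m) b m := by
  rw [PySem.List.pyRange_of_pos _ _ hm, PySem.List.pyRange_of_pos _ _ hm]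
  have key : (b - a + m - 1) / m = (b - (a + m) + m - 1) / m + 1 := by
    have h1 : b - a + m - 1 = (b - (a + m) + m - 1) + 1 * m := by ring
    rw [h1, Int.add_mul_ediv_right _ _ (by omega : m ≠ 0)]
  rw [if_pos hab]
  by_cases h2 : a + m < b
  · have hq0 : 0 ≤ (b - (a + m) + m - 1) / m := Int.ediv_nonneg (by omega) (by omega)
    rw [if_pos h2, key]
    have ht : ((b - (a + m) + m - 1) / m + 1).toNat = ((b - (a + m) + m - 1) / m).toNat + 1 := by omega
    rw [ht, List.range_succ_eq_map]
    simp only [List.map_cons, List.map_map]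
    congr 1
    · simp
    · apply List.map_congr_left
      intro n _
      simp [Function.comp, Nat.succ_eq_add_one]
      ring
  · have hz : (b - (a + m) + m - 1) / m = 0 := by
      have h3 : (b - (a + m) + m - 1) = b - a - 1 := by ring
      rw [h3]
      exact Int.ediv_eq_zero_of_lt (by omega) (by omega)
    rw [if_neg h2, key, hz]
    simp

-- in a descending-sorted (Pairwise ≥) list the last element is a minimum
theorem getLast_le_of_pairwise_ge (l : List Int) (hl : l ≠ [])
    (hp : l.Pairwise (fun a b => b ≤ a)) : ∀ x ∈ l, l.getLast hl ≤ x := by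
  induction l with
  | nil => simp at hl
  | cons x t ih =>
    rcases List.pairwise_cons.mp hp with ⟨hx, ht⟩
    intro y hy
    cases t with
    | nil => simp at hy; simp [List.getLast, hy]
    | cons z t' =>
      rw [List.getLast_cons (by simp)]
      rcases List.mem_cons.mp hy with rfl | hy'
      · exact le_trans (hx _ (List.getLast_mem _)) le_rfl
      · exact ih (by simp) ht y hy'

-- the min of a complete group in the descending-sorted list is its last element
theorem min_chunk (s : List Int) (hs : s.Pairwise (fun a b => b ≤ a)) (idx m : Int)
    (hm : 1 ≤ m) (h0 : 0 ≤ idx) (h : idx + m ≤ (s.length : Int)) :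
    ((PySem.List.min? (List.take m.toNat (List.drop idx.toNat s)) (fun x => x)).getD 0)
      = PySem.List.pyGetD s (idx + m - 1) 0 := by
  set chunk := List.take m.toNat (List.drop idx.toNat s) with hc
  have hlen : chunk.length = m.toNat := by
    simp [hc]; omega
  have hne : chunk ≠ [] := by
    intro hnil; rw [hnil] at hlen; simp at hlen; omega
  obtain ⟨v, hv⟩ : ∃ v, PySem.List.min? chunk (fun x => x) = some v := by
    cases hmin : PySem.List.min? chunk (fun x => x) with
    | none => exact absurd ((PySem.List.min?_eq_none_iff _ _).mp hmin) hne
    | some v => exact ⟨v, rfl⟩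
  have hvmem := PySem.List.min?_mem hv
  have hvmin := PySem.List.min?_isMin hv
  have hsub : chunk.Sublist s := ((List.take_sublist _ _).trans (List.drop_sublist _ _))
  have hcp : chunk.Pairwise (fun a b => b ≤ a) := List.Pairwise.sublist hsub hs
  have hlast := getLast_le_of_pairwise_ge chunk hne hcp
  have hidx : (idx + m - 1).toNat = idx.toNat + (m.toNat - 1) := by omega
  have hlt : idx.toNat + (m.toNat - 1) < s.length := by omega
  have hgl : chunk.getLast hne = s[idx.toNat + (m.toNat - 1)] := by
    have h1 : chunk[m.toNat - 1]'(by omega) = s[idx.toNat + (m.toNat - 1)]'hlt := by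
      calc chunk[m.toNat - 1]'(by omega)
          = (List.drop idx.toNat s)[m.toNat - 1]'(by simp; omega) := List.getElem_take
        _ = s[idx.toNat + (m.toNat - 1)] := List.getElem_drop
    rw [List.getLast_eq_getElem]
    convert h1 using 2
    omega
  have h1 : v ≤ chunk.getLast hne := hvmin _ (List.getLast_mem hne)
  have h2 : chunk.getLast hne ≤ v := hlast v hvmem
  have hveq : v = chunk.getLast hne := le_antisymm h1 h2
  rw [hv, Option.getD_some, hveq, hgl,
    PySem.List.pyGetD_eq_getElem s 0 (by omega) (by push_cast; omega)]
  congr 1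
  omega

-- A's inner for-loop fills the box with the chunk and fires exactly at its end
theorem innerA_spec (s : List Int) (m : Int) :
    ∀ (c : Nat) (a ans ix : Int) (box : List Int), 1 ≤ c → (box.length : Int) + c = m →
      0 ≤ a → a + c ≤ (s.length : Int) →
      (PySem.List.pyRange a (a + c) 1).foldl (innerStepA s m) (ans, ix, box)
        = (ans + (PySem.List.min? (box ++ List.take c (List.drop a.toNat s)) (fun x => x)).getD 0 * m,
           ix + m, []) := by
  intro c
  induction c with
  | zero => omega
  | succ c ih =>
    intro a ans ix box _ hbox ha hub
    have halt : a.toNat < s.length := by omega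
    have hdrop : List.drop a.toNat s = s[a.toNat] :: List.drop (a.toNat + 1) s :=
      List.drop_eq_getElem_cons halt
    have hget : PySem.List.pyGetD s a 0 = s[a.toNat] :=
      PySem.List.pyGetD_eq_getElem s 0 ha (by push_cast; omega)
    by_cases hc : c = 0
    · subst hc
      rw [show a + ((1:Nat):Int) = a + 1 by push_cast; ring, PySem.List.pyRange_one_singleton]
      simp only [List.foldl_cons, List.foldl_nil, innerStepA]
      rw [if_pos (by simp; push_cast at hbox ⊢; omega), hdrop, hget, List.take_succ_cons,
        List.take_zero]
    · have hcc : a < a + (c+1 : Nat) := by push_cast; omega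
      rw [PySem.List.pyRange_one_cons hcc]
      simp only [List.foldl_cons]
      have hstep : innerStepA s m (ans, ix, box) a = (ans, ix, box ++ [s[a.toNat]]) := by
        simp only [innerStepA, hget]
        rw [if_neg (by simp; push_cast at hbox ⊢; omega)]
      rw [hstep]
      have hih := ih (a+1) ans ix (box ++ [s[a.toNat]]) (by omega) (by simp; push_cast at hbox ⊢; omega)
        (by omega) (by push_cast at hub ⊢; omega)
      rw [show a + ((c+1:Nat):Int) = a + 1 + (c:Nat) by push_cast; ring]
      rw [hih]
      have htake : List.take (c+1) (List.drop a.toNat s)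
          = s[a.toNat] :: List.take c (List.drop (a+1).toNat s) := by
        rw [show (a+1).toNat = a.toNat + 1 from by omega, hdrop, List.take_succ_cons]
      rw [htake]
      simp

theorem loopA_spec (s : List Int) (m : Int) (hm : 1 ≤ m)
    (hs : s.Pairwise (fun a b => b ≤ a)) :
    ∀ (fuel : Nat) (idx ans : Int), 0 ≤ idx → (s.length : Int) < idx + fuel * m →
      loopA s m fuel ans idx []
        = (PySem.List.pyRange idx ((s.length : Int) - m + 1) m).foldl
            (fun a i => a + PySem.List.pyGetD s (i + m - 1) 0 * m) ans := by
  intro fuel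
  induction fuel with
  | zero =>
    intro idx ans h0 hfuel
    simp only [Nat.cast_zero, zero_mul, add_zero] at hfuel
    rw [loopA, pyRange_pos_eq_nil _ _ _ (by omega) (by omega)]
    rfl
  | succ fuel ih =>
    intro idx ans h0 hfuel
    rw [loopA]
    by_cases hcond : idx + m ≤ (s.length : Int)
    · rw [if_pos hcond]
      have hinner := innerA_spec s m m.toNat idx ans idx [] (by omega)
        (by simp; omega) h0 (by omega)
      rw [show idx + m = idx + (m.toNat : Int) from by omega] at hcond ⊢
      rw [hinner]
      simp only [List.nil_append]
      rw [min_chunk s hs idx m hm h0 (by omega)]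
      rw [ih (idx + m) _ (by omega) (by push_cast at hfuel ⊢; nlinarith)]
      rw [pyRange_pos_cons idx ((s.length : Int) - m + 1) m (by omega) (by omega)]
      rw [List.foldl_cons]
    · rw [if_neg hcond, pyRange_pos_eq_nil _ _ _ (by omega) (by omega)]
      rfl

-- descending sort is the reverse of ascending sort (Int values: equal keys are equal elements)
theorem sorted_rev_eq_reverse_sorted (xs : List Int) :
    PySem.List.sorted xs (fun x => x) true = (PySem.List.sorted xs (fun x => x) false).reverse := by
  apply List.eq_of_perm_of_sorted (le := fun a b : Int => b ≤ a)
  · intro a b _ _ h1 h2; exact le_antisymm h2 h1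
  · exact PySem.List.sorted_pairwise_rev xs _
  · rw [List.pairwise_reverse]
    exact PySem.List.sorted_pairwise xs _
  · exact ((PySem.List.sorted_perm xs _ true).trans (PySem.List.sorted_perm xs _ false).symm).trans
      (List.reverse_perm _).symm

-- the strided slice s[r::m] (0 ≤ r ≤ len, 0 < m) is the index comprehension over range(r, len, m)
theorem slice?_from_step (xs : List Int) (r m : Int) (hm : 0 < m) (h0 : 0 ≤ r)
    (hr : r ≤ (xs.length : Int)) :
    PySem.List.slice? xs (some r) none m
      = some ((PySem.List.pyRange r (xs.length : Int) m).map (fun i => PySem.List.pyGetD xs i 0)) := by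
  rw [PySem.List.pyRange_of_pos _ _ hm, List.map_map]
  simp only [PySem.List.slice?, PySem.List.sliceIndices]
  rw [if_neg (by omega : ¬ m = 0)]
  rw [if_neg (by omega : ¬ m < 0), if_neg (by omega : ¬ m < 0), if_neg (by omega : ¬ m < 0),
    if_neg (by omega : ¬ r < 0), if_pos hm]
  rw [min_eq_left hr]
  congr 1
  apply List.filterMap_eq_map_iff_forall_eq_some.mpr
  intro k hk
  have hkc : r < (xs.length : Int) ∧ (k : Int) ≤ (↑xs.length - r + m - 1) / m - 1 := by
    rw [List.mem_range] at hk
    split_ifs at hk with h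
    · exact ⟨h, by omega⟩
    · omega
  have hdiv : ((↑xs.length - r + m - 1) / m) * m ≤ (↑xs.length : Int) - r + m - 1 :=
    Int.ediv_mul_le _ (by omega)
  have hidx : 0 ≤ r + m * (k : Int) ∧ r + m * (k : Int) < (xs.length : Int) := by
    constructor
    · positivity
    · nlinarith [hkc.2, hdiv]
  simp only [Function.comp_apply]
  rw [PySem.List.pyGetD_eq_getElem xs 0 (by omega) (by omega)]
  rw [List.getElem?_eq_getElem (by omega)]

-- A's descending group-minima list is the reverse of B's ascending strided slice
theorem chunk_mins_eq_reverse (sa : List Int) (m : Int) (hm : 1 ≤ m) :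
    (PySem.List.pyRange 0 ((sa.length : Int) - m + 1) m).map
        (fun i => PySem.List.pyGetD sa.reverse (i + m - 1) 0)
      = ((PySem.List.pyRange (PySem.Int.mod (sa.length : Int) m) (sa.length : Int) m).map
          (fun i => PySem.List.pyGetD sa i 0)).reverse := by
  have hL0 : (0:Int) ≤ (sa.length : Int) := by positivity
  have hrmod : PySem.Int.mod (sa.length : Int) m = (sa.length : Int) % m :=
    PySem.Int.mod_eq_emod_of_pos (by omega)
  have hr0 : 0 ≤ (sa.length : Int) % m := Int.emod_nonneg _ (by omega)
  have hrm : (sa.length : Int) % m < m := Int.emod_lt_of_pos _ (by omega)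
  have hg0 : 0 ≤ (sa.length : Int) / m := Int.ediv_nonneg hL0 (by omega)
  have hdm : m * ((sa.length : Int) / m) + (sa.length : Int) % m = (sa.length : Int) :=
    Int.mul_ediv_add_emod _ _
  set L : Int := (sa.length : Int) with hLdef
  set g : Int := L / m with hgdef
  set r : Int := L % m with hrdef
  -- both ranges have exactly g.toNat elements
  have hcnt1 : (if (0:Int) < L - m + 1 then ((L - m + 1 - 0 + m - 1) / m).toNat else 0) = g.toNat := by
    by_cases h : 0 < L - m + 1
    · rw [if_pos h, show L - m + 1 - 0 + m - 1 = L from by ring]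
    · rw [if_neg h]
      have hgz : g = 0 := by
        rw [hgdef]; exact Int.ediv_eq_zero_of_lt hL0 (by omega)
      simp [hgz]
  have hcnt2 : (if r < L then ((L - r + m - 1) / m).toNat else 0) = g.toNat := by
    by_cases h : r < L
    · rw [if_pos h, show L - r + m - 1 = (m - 1) + g * m from by rw [← hdm]; ring,
        Int.add_mul_ediv_right _ _ (by omega : m ≠ 0),
        Int.ediv_eq_zero_of_lt (by omega) (by omega)]
      simp
    · rw [if_neg h]
      have hgz : g = 0 := by nlinarith
      simp [hgz]
  have hc1 : PySem.List.pyRange 0 (L - m + 1) m = List.map (fun k : Nat => 0 + m * (k:Int)) (List.range g.toNat) := by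
    rw [PySem.List.pyRange_of_pos _ _ (by omega : (0:Int) < m), hcnt1]
  have hc2 : PySem.List.pyRange r L m = List.map (fun k : Nat => r + m * (k:Int)) (List.range g.toNat) := by
    rw [PySem.List.pyRange_of_pos _ _ (by omega : (0:Int) < m), hcnt2]
  rw [hrmod, hc1, hc2, List.map_map, List.map_map]
  apply List.ext_getElem
  · simp
  · intro j h1 h2
    simp only [List.length_map, List.length_range] at h1
    simp only [List.getElem_map, List.getElem_range, List.getElem_reverse, List.length_map,
      List.length_range, Function.comp_apply]
    have hjg : (j : Int) < g := by omega
    have hmj : m * (j:Int) + m ≤ m * g := by nlinarith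
    have hmj0 : 0 ≤ m * (j:Int) := by positivity
    have hcast : ((g.toNat - 1 - j : Nat) : Int) = g - 1 - (j:Int) := by omega
    have hmg : m * (g - 1 - (j:Int)) = m * g - m - m * (j:Int) := by ring
    rw [hcast]
    have hlenrev : (sa.reverse.length : Int) = L := by simp only [List.length_reverse]; exact hLdef.symm
    rw [PySem.List.pyGetD_eq_getElem sa.reverse 0 (by omega) (by rw [hlenrev]; omega)]
    rw [PySem.List.pyGetD_eq_getElem sa 0 (by omega) (by omega)]
    rw [List.getElem_reverse]
    have hfin : sa.length - 1 - (0 + m * (j:Int) + m - 1).toNat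
        = (r + m * (g - 1 - (j:Int))).toNat := by omega
    simp only [hfin]

-- ===== VERDICT (by name: the statement is the Claim_ definition above) =====
theorem solution_spec : Claim_equal_solution := by
  intro k m score _ hm
  have hm1 : 1 ≤ m := hm
  unfold Spec_solution solution solution_alt
  have hs := PySem.List.sorted_pairwise_rev score (fun x => x)
  set sd := PySem.List.sorted score (fun x => x) true with hsdef
  set sa := PySem.List.sorted score (fun x => x) false with hsadef
  have hlen : sd.length = score.length := PySem.List.length_sorted score (fun x => x) true
  have hlena : sa.length = score.length := PySem.List.length_sorted score (fun x => x) false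
  have hfuel : (sd.length : Int) < 0 + ((score.length + 1 : Nat) : Int) * m := by
    rw [hlen]; push_cast; nlinarith
  rw [loopA_spec sd m hm1 hs (score.length + 1) 0 0 le_rfl hfuel]
  show _ = ((PySem.List.slice? sa (some (PySem.Int.mod ((sa.length : Int)) m)) none m).getD []).sum * m
  have hmodle : PySem.Int.mod ((sa.length : Int)) m ≤ (sa.length : Int) := by
    have hid := PySem.Int.floordiv_mul_add_mod ((sa.length : Int)) m
    have hfd : 0 ≤ PySem.Int.floordiv ((sa.length : Int)) m := by
      rw [PySem.Int.floordiv_eq_ediv_of_pos (by omega : (0:Int) < m)]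
      exact Int.ediv_nonneg (by positivity) (by omega)
    nlinarith
  rw [slice?_from_step sa _ m (by omega) (PySem.Int.mod_nonneg _ (by omega)) hmodle]
  rw [Option.getD_some]
  rw [PySem.List.foldl_add _ (fun i => PySem.List.pyGetD sd (i + m - 1) 0 * m) 0]
  have hrev : sd = sa.reverse := sorted_rev_eq_reverse_sorted score
  rw [zero_add, hrev, show (sa.reverse.length : Int) = (sa.length : Int) by simp]
  rw [show (List.map (fun i => PySem.List.pyGetD sa.reverse (i + m - 1) 0 * m)
        (PySem.List.pyRange 0 ((sa.length : Int) - m + 1) m))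
      = (List.map (fun x => x * m) (List.map (fun i => PySem.List.pyGetD sa.reverse (i + m - 1) 0)
        (PySem.List.pyRange 0 ((sa.length : Int) - m + 1) m))) by rw [List.map_map]; rfl]
  rw [chunk_mins_eq_reverse sa m hm1, List.map_reverse, List.sum_reverse, List.map_map]
  exact List.sum_map_mul_right _ (fun i => PySem.List.pyGetD sa i 0) m
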